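-- pv_equiv track=rewrite | github.com/Fleeting198/LZC | app/controls/ACValid.py | ACValid
-- ===== SOURCE A (Python) =====
-- def ACValid(inp):
--     outp = {}
--     for result in inp:
--         if str(result) not in outp:
--             outp[str(result)] = 1
--         else:
--             outp[str(result)] += 1
--
--     outp['valid'] = outp.pop('1')
--     outp['invalid'] = outp.pop('0')
--
--     return outp
-- ===== SOURCE B (Python) =====
-- def ACValid(inp):
--     # Partition-extraction counting: repeatedly take the first remaining key,
--     # record how often it occurs in the remainder, and strip all its occurrences.
--     rest = [str(x) for x in inp]
--     pairs = []
--     while rest: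
--         k = rest[0]
--         pairs.append((k, rest.count(k)))
--         rest = [x for x in rest if x != k]
--     outp = dict(pairs)
--     outp['valid'] = outp.pop('1')
--     outp['invalid'] = outp.pop('0')
--     return outp
-- ===== Notes on version B (the rewrite author's own statement) =====
-- stated objective: alternative
-- what changed: A counts with a single hash pass incrementing a dict entry per element; B counts by partition-extraction: it repeatedly takes the first remaining key, records its count over the remainder with one scan, filters out all its occurrences, and only at the end materialises the pair list as a dict before the valid/invalid renames.
import Mathlib
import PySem

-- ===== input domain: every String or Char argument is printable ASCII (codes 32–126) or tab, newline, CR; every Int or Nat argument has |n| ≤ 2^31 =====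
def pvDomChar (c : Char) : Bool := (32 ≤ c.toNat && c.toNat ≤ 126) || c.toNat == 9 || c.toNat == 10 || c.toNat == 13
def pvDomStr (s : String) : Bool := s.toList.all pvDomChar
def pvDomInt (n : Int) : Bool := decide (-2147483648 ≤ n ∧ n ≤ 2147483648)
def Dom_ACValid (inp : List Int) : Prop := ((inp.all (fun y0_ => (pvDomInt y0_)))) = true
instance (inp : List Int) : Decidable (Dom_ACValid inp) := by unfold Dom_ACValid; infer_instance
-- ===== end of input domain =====

-- B counts by partition-extraction (strip the first key's occurrences, one scan per distinct key)
-- instead of A's incremental hash-increment pass (objective: alternative). Same return value wherever A returns.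

-- ===== PORT A =====
-- one hash pass: new key ↦ 1, seen key ↦ +1
def ACValid (inp : List Int) : List (String × Int) :=
  let outp : PySem.Dict String Int :=
    inp.foldl (fun d r =>
      if d.contains (PySem.Int.toStr r) = false then
        d.insert (PySem.Int.toStr r) 1
      else
        d.insert (PySem.Int.toStr r) (d.getD (PySem.Int.toStr r) 0 + 1)) PySem.Dict.empty
  match outp.pop? "1" with
  | none => []  -- Python: KeyError (excluded by Pre_)
  | some (v1, d1) =>
    match (d1.insert "valid" v1).pop? "0" with
    | none => []  -- Python: KeyError (excluded by Pre_)
    | some (v0, d2) => (d2.insert "invalid" v0).items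

-- ===== PORT B =====
-- the while loop of Source B: take rest[0], count it in rest, filter it out, recurse on the remainder
def pvExtract (rest : List String) : List (String × Int) :=
  match rest with
  | [] => []
  | k :: t => (k, ((k :: t).count k : Int)) :: pvExtract (t.filter (fun x => x ≠ k))
termination_by rest.length
decreasing_by
  rw [List.length_unattach]
  exact Nat.lt_succ_of_le ((List.length_filter_le _ _).trans (by simp))

def ACValid_alt (inp : List Int) : List (String × Int) :=
  let pairs := pvExtract (inp.map (fun x => PySem.Int.toStr x))
  let outp : PySem.Dict String Int :=
    pairs.foldl (fun d p => d.insert p.1 p.2) PySem.Dict.empty   -- dict(pairs)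
  match outp.pop? "1" with
  | none => []  -- Python: KeyError (excluded by Pre_)
  | some (v1, d1) =>
    match (d1.insert "valid" v1).pop? "0" with
    | none => []  -- Python: KeyError (excluded by Pre_)
    | some (v0, d2) => (d2.insert "invalid" v0).items

-- ===== PRECONDITION & SPEC =====
-- A raises KeyError (dict.pop) unless both 1 and 0 occur in inp; exactly those inputs are excluded.
def Pre_ACValid (inp : List Int) : Prop := (1 : Int) ∈ inp ∧ (0 : Int) ∈ inp
instance (inp : List Int) : Decidable (Pre_ACValid inp) := by unfold Pre_ACValid; infer_instance
def pvWitness_ACValid : List Int := [1, 0]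
def Spec_ACValid (inp : List Int) (out : List (String × Int)) : Prop := out = ACValid_alt inp
instance (inp : List Int) (out : List (String × Int)) : Decidable (Spec_ACValid inp out) := by unfold Spec_ACValid; infer_instance

-- ===== CLAIM (what is proved, stated in full; the proofs are below) =====
def Claim_equal_ACValid : Prop := ∀ (inp : List Int), Dom_ACValid inp → Pre_ACValid inp → Spec_ACValid inp (ACValid inp)

-- ===== LEMMAS AND PROOFS =====

-- A's loop step is exactly the counter step (in the new-key branch getD is the default 0).
lemma stepA_eq (d : PySem.Dict String Int) (r : Int) :
    (if d.contains (PySem.Int.toStr r) = false then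
        d.insert (PySem.Int.toStr r) 1
      else
        d.insert (PySem.Int.toStr r) (d.getD (PySem.Int.toStr r) 0 + 1))
    = d.insert (PySem.Int.toStr r) (d.getD (PySem.Int.toStr r) 0 + 1) := by
  by_cases hc : d.contains (PySem.Int.toStr r) = false
  · rw [if_pos hc, PySem.Dict.getD_of_not_contains d 0 hc]; norm_num
  · rw [if_neg hc]

-- A's dict is Counter(keys).
lemma dictA_items (inp : List Int) :
    (inp.foldl (fun d r =>
      if d.contains (PySem.Int.toStr r) = false then
        d.insert (PySem.Int.toStr r) 1
      else
        d.insert (PySem.Int.toStr r) (d.getD (PySem.Int.toStr r) 0 + 1)) PySem.Dict.empty).items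
    = (PySem.Set.ofList (inp.map (fun x => PySem.Int.toStr x))).map
        (fun k => (k, ((inp.map (fun x => PySem.Int.toStr x)).count k : Int))) := by
  have hf : (fun (d : PySem.Dict String Int) (r : Int) =>
      if d.contains (PySem.Int.toStr r) = false then
        d.insert (PySem.Int.toStr r) 1
      else
        d.insert (PySem.Int.toStr r) (d.getD (PySem.Int.toStr r) 0 + 1))
      = fun d r => d.insert (PySem.Int.toStr r) (d.getD (PySem.Int.toStr r) 0 + 1) :=
    funext fun d => funext fun r => stepA_eq d r
  rw [hf]
  have hmap : List.foldl (fun (d : PySem.Dict String Int) (r : Int) =>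
        d.insert (PySem.Int.toStr r) (d.getD (PySem.Int.toStr r) 0 + 1)) PySem.Dict.empty inp
      = List.foldl (fun (d : PySem.Dict String Int) k => d.insert k (d.getD k 0 + 1))
          PySem.Dict.empty (inp.map (fun x => PySem.Int.toStr x)) :=
    (List.foldl_map (f := fun x => PySem.Int.toStr x)
      (g := fun (d : PySem.Dict String Int) k => d.insert k (d.getD k 0 + 1))
      (l := inp) (init := PySem.Dict.empty)).symm
  rw [hmap, PySem.Dict.foldl_insert_getD_add_one_eq_counter, PySem.Dict.items_counter]

-- dedup commutes with filtering out one value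
lemma ofList_filter_ne (t : List String) (k : String) :
    PySem.Set.ofList (t.filter (fun x => x ≠ k))
      = (PySem.Set.ofList t).filter (fun x => x ≠ k) := by
  induction t using List.reverseRecOn with
  | nil => simp [PySem.Set.ofList_nil]
  | append_singleton t x ih =>
    rw [List.filter_append, PySem.Set.ofList_append_singleton]
    by_cases hx : x = k
    · subst hx
      simp only [List.filter_cons, List.filter_nil]
      rw [if_neg (by simp), List.append_nil, ih]
      unfold PySem.Set.add
      by_cases hc : PySem.Set.contains (PySem.Set.ofList t) x
      · rw [if_pos hc]
      · rw [if_neg hc, List.filter_append]; simp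
    · simp only [List.filter_cons, List.filter_nil]
      rw [if_pos (by simp [hx]), PySem.Set.ofList_append_singleton, ih]
      unfold PySem.Set.add
      by_cases hc : PySem.Set.contains (PySem.Set.ofList t) x
      · rw [if_pos hc, if_pos]
        unfold PySem.Set.contains at *
        simp_all [List.mem_filter]
      · rw [if_neg hc, if_neg, List.filter_append]
        · simp [hx]
        · unfold PySem.Set.contains at *
          simp_all [List.mem_filter]

lemma pvExtract_eq_aux (n : Nat) : ∀ (rest : List String), rest.length ≤ n →
    pvExtract rest
      = (PySem.Set.ofList rest).map (fun k => (k, (rest.count k : Int))) := by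
  induction n with
  | zero =>
    intro rest h
    have : rest = [] := List.eq_nil_of_length_eq_zero (Nat.le_zero.mp h)
    subst this; rw [pvExtract]; simp [PySem.Set.ofList_nil]
  | succ n ih =>
    intro rest h
    match rest with
    | [] => rw [pvExtract]; simp [PySem.Set.ofList_nil]
    | k :: t =>
      rw [pvExtract]
      rw [ih _ ((List.length_filter_le _ _).trans (by simpa using Nat.succ_le_succ_iff.mp h))]
      rw [ofList_filter_ne, PySem.Set.ofList_cons]
      have hdis : PySem.Set.discard (PySem.Set.ofList t) k
          = (PySem.Set.ofList t).filter (fun x => x ≠ k) := by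
        unfold PySem.Set.discard
        apply List.filter_congr
        intro y _
        by_cases hyk : y = k <;> simp [hyk]
      rw [← hdis, List.map_cons]
      congr 1
      apply List.map_congr_left
      intro x hx
      have hxk : x ≠ k := by
        unfold PySem.Set.discard at hx
        simp [List.mem_filter] at hx
        exact hx.2
      have h1 : (t.filter (fun x => x ≠ k)).count x = t.count x := by
        rw [List.count_filter]; simp [hxk]
      rw [h1]
      simp [Ne.symm hxk]

lemma pvExtract_eq (rest : List String) :
    pvExtract rest
      = (PySem.Set.ofList rest).map (fun k => (k, (rest.count k : Int))) :=
  pvExtract_eq_aux rest.length rest le_rfl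

lemma dict_eq (inp : List Int) :
    (inp.foldl (fun d r =>
      if d.contains (PySem.Int.toStr r) = false then
        d.insert (PySem.Int.toStr r) 1
      else
        d.insert (PySem.Int.toStr r) (d.getD (PySem.Int.toStr r) 0 + 1)) PySem.Dict.empty)
    = ((pvExtract (inp.map (fun x => PySem.Int.toStr x))).foldl
        (fun d p => d.insert p.1 p.2) PySem.Dict.empty) := by
  apply PySem.Dict.ext
  rw [dictA_items]
  have hB : ((pvExtract (inp.map (fun x => PySem.Int.toStr x))).foldl
        (fun d p => d.insert p.1 p.2) (PySem.Dict.empty : PySem.Dict String Int)).items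
      = (pvExtract (inp.map (fun x => PySem.Int.toStr x))).map (fun a => (a.1, a.2)) := by
    exact PySem.Dict.items_foldl_insert_fresh _ Prod.fst Prod.snd PySem.Dict.empty
      (by intro a _; rfl)
      (by rw [pvExtract_eq]
          simp [List.map_map, Function.comp_def, PySem.Set.nodup_ofList])
  rw [hB]
  rw [pvExtract_eq (inp.map (fun x => PySem.Int.toStr x))]
  simp only [List.map_map]
  apply List.map_congr_left
  intro x _
  rfl

-- ===== VERDICT (by name: the statement is the Claim_ definition above) =====
theorem ACValid_spec : Claim_equal_ACValid := by
  intro inp _ _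
  show ACValid inp = ACValid_alt inp
  simp only [ACValid, ACValid_alt, dict_eq inp]
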